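-- pv_equiv track=rewrite | github.com/garrethmartin/garrethmartin.github.io | generate_publist.py | latex_to_utf8
-- ===== SOURCE A (Python) =====
-- def latex_to_utf8(text):
--     # str.replace rather than re.sub — all replacements are literal strings
--     replacements = {
--         r"\'a": "á", r'\"a': "ä", r"\'e": "é", r'\"e': "ë",
--         r"\'i": "í", r'\"i': "ï", r"\'o": "ó", r'\"o': "ö",
--         r"\'u": "ú", r'\"u': "ü", r"\~n": "ñ", r"\c{c}": "ç",
--         r"\'A": "Á", r'\"A': "Ä", r"\&": "&", r"``": "\u201c", r"''": "\u201d",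
--     }
--     for latex, char in replacements.items():
--         text = text.replace(latex, char)
--     return text
-- ===== SOURCE B (Python) =====
-- def latex_to_utf8(text):
--     # single left-to-right scan: at each position substitute the first matching
--     # LaTeX escape, instead of 17 sequential full-string replace passes
--     table = [
--         ("\\'a", "\u00e1"), ('\\"a', "\u00e4"), ("\\'e", "\u00e9"),
--         ('\\"e', "\u00eb"), ("\\'i", "\u00ed"), ('\\"i', "\u00ef"),
--         ("\\'o", "\u00f3"), ('\\"o', "\u00f6"), ("\\'u", "\u00fa"),
--         ('\\"u', "\u00fc"), ("\\~n", "\u00f1"), ("\\c{c}", "\u00e7"),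
--         ("\\'A", "\u00c1"), ('\\"A', "\u00c4"), ("\\&", "&"),
--         ("``", "\u201c"), ("''", "\u201d"),
--     ]
--     out = []
--     i = 0
--     n = len(text)
--     while i < n:
--         for k, v in table:
--             if text.startswith(k, i):
--                 out.append(v)
--                 i += len(k)
--                 break
--         else:
--             out.append(text[i])
--             i += 1
--     return "".join(out)
-- ===== Notes on version B (the rewrite author's own statement) =====
-- stated objective: alternative
-- what changed: Replaces 17 sequential full-string str.replace passes with a single left-to-right scan that, at each position, substitutes the first matching LaTeX escape (valid because no two distinct keys overlap and no replacement output re-creates key characters).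
import Mathlib
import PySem

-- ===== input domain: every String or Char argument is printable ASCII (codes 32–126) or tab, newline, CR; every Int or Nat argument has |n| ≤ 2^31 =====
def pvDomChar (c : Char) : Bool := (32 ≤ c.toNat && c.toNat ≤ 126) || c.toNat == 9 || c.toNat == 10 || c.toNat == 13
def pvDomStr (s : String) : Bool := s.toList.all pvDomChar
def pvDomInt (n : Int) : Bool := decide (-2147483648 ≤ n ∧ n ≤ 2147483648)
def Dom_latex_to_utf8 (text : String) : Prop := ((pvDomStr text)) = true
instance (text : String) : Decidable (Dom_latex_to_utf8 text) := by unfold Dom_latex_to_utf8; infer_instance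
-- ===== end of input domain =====

-- B replaces A's 17 sequential full-string replace passes by ONE left-to-right scan that
-- substitutes the first matching LaTeX escape at each position (objective: alternative).

-- ===== PORT A =====
-- the `replacements` dict of A, as an association list in insertion order
def pvReplacements : List (String × String) := [
  ("\\'a", "á"),
  ("\\\"a", "ä"),
  ("\\'e", "é"),
  ("\\\"e", "ë"),
  ("\\'i", "í"),
  ("\\\"i", "ï"),
  ("\\'o", "ó"),
  ("\\\"o", "ö"),
  ("\\'u", "ú"),
  ("\\\"u", "ü"),
  ("\\~n", "ñ"),
  ("\\c{c}", "ç"),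
  ("\\'A", "Á"),
  ("\\\"A", "Ä"),
  ("\\&", "&"),
  ("``", "“"),
  ("''", "”")]

-- A: for latex, char in replacements.items(): text = text.replace(latex, char)
def latex_to_utf8 (text : String) : String :=
  List.foldl (fun t p => PySem.Str.replace t p.1 p.2) text pvReplacements

-- ===== PORT B =====
-- the same table, on code points (Source B scans the string by index; Lean scans the char list)
def pvKeys : List (List Char × List Char) := [
  (['\\', '\'', 'a'], ['á']),
  (['\\', '"', 'a'], ['ä']),
  (['\\', '\'', 'e'], ['é']),
  (['\\', '"', 'e'], ['ë']),
  (['\\', '\'', 'i'], ['í']),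
  (['\\', '"', 'i'], ['ï']),
  (['\\', '\'', 'o'], ['ó']),
  (['\\', '"', 'o'], ['ö']),
  (['\\', '\'', 'u'], ['ú']),
  (['\\', '"', 'u'], ['ü']),
  (['\\', '~', 'n'], ['ñ']),
  (['\\', 'c', '{', 'c', '}'], ['ç']),
  (['\\', '\'', 'A'], ['Á']),
  (['\\', '"', 'A'], ['Ä']),
  (['\\', '&'], ['&']),
  (['`', '`'], ['“']),
  (['\'', '\''], ['”'])]

-- Source B's inner `for k, v in items: if text.startswith(k, i)`: the first table entry matching here
def pvFirstKey (J : List (List Char × List Char)) (s : List Char) :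
    Option (List Char × List Char) :=
  J.find? (fun p => !p.1.isEmpty && p.1.isPrefixOf s)

theorem pvFirstKey_some {J : List (List Char × List Char)} {s : List Char}
    {p : List Char × List Char} (h : pvFirstKey J s = some p) :
    p.1 ≠ [] ∧ p.1 <+: s := by
  have := List.find?_some h
  simp only [Bool.and_eq_true, Bool.not_eq_true', List.isEmpty_eq_false_iff,
    List.isPrefixOf_iff_prefix] at this
  simpa using this

-- Source B's while-loop: emit the first match's replacement and jump past the key, else copy one char
def pvScan (J : List (List Char × List Char)) : List Char → List Char
  | [] => []
  | c :: t =>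
    match h : pvFirstKey J (c :: t) with
    | some p => p.2 ++ pvScan J ((c :: t).drop p.1.length)
    | none => c :: pvScan J t
termination_by s => s.length
decreasing_by
  · obtain ⟨hne, hpre⟩ := pvFirstKey_some h
    have h1 : 1 ≤ p.1.length := by cases hp : p.1 <;> simp_all
    have h2 := hpre.length_le
    simp only [List.length_drop]
    omega
  · simp

def latex_to_utf8_alt (text : String) : String :=
  String.ofList (pvScan pvKeys text.toList)

-- ===== PRECONDITION & SPEC =====
def Spec_latex_to_utf8 (text : String) (out : String) : Prop := out = latex_to_utf8_alt text
instance (text : String) (out : String) : Decidable (Spec_latex_to_utf8 text out) := by unfold Spec_latex_to_utf8; infer_instance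

-- ===== CLAIM (what is proved, stated in full; the proofs are below) =====
def Claim_equal_latex_to_utf8 : Prop := ∀ (text : String), Dom_latex_to_utf8 text → Spec_latex_to_utf8 text (latex_to_utf8 text)

-- ===== LEMMAS AND PROOFS =====

theorem pvScan_nil (J : List (List Char × List Char)) : pvScan J [] = [] := by
  simp [pvScan]

theorem pvScan_cons_some {J : List (List Char × List Char)} {c : Char} {t : List Char}
    {p : List Char × List Char} (h : pvFirstKey J (c :: t) = some p) :
    pvScan J (c :: t) = p.2 ++ pvScan J ((c :: t).drop p.1.length) := by
  rw [pvScan]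
  split
  · rename_i p' heq
    rw [h] at heq
    cases heq
    rfl
  · rename_i heq
    rw [h] at heq
    cases heq

theorem pvScan_cons_none {J : List (List Char × List Char)} {c : Char} {t : List Char}
    (h : pvFirstKey J (c :: t) = none) :
    pvScan J (c :: t) = c :: pvScan J t := by
  rw [pvScan]
  split
  · rename_i p' heq
    rw [h] at heq
    cases heq
  · rfl

theorem pvScan_empty (s : List Char) : pvScan [] s = s := by
  induction s with
  | nil => simp [pvScan]
  | cons c t ih => rw [pvScan]; simp [pvFirstKey]; exact ih

-- A single str.replace pass IS the single-key scan
theorem pvGo_eq_scan (k v : List Char) (hk : k ≠ []) :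
    ∀ fuel l acc, l.length ≤ fuel →
      PySem.Chars.replace.go k v fuel l acc = acc.reverse ++ pvScan [(k, v)] l := by
  intro fuel
  induction fuel with
  | zero =>
    intro l acc hl
    have : l = [] := by cases l <;> simp_all
    subst this
    simp [PySem.Chars.replace.go, pvScan]
  | succ n ih =>
    intro l acc hl
    cases l with
    | nil => simp [PySem.Chars.replace.go, pvScan]
    | cons c t =>
      rw [PySem.Chars.replace.go]
      by_cases hpre : k.isPrefixOf (c :: t)
      · rw [if_pos hpre]
        have hlen : k.length ≤ (c :: t).length := (List.isPrefixOf_iff_prefix.1 hpre).length_le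
        have h1 : 1 ≤ k.length := by cases k <;> simp_all
        rw [ih _ _ (by simp only [List.length_drop]; simp at hl ⊢; omega)]
        rw [pvScan]
        have hfk : pvFirstKey [(k, v)] (c :: t) = some (k, v) := by
          simp [pvFirstKey, List.find?, hpre, List.isEmpty_eq_false_iff.2 hk]
        rw [hfk]
        simp
      · rw [if_neg hpre]
        rw [ih _ _ (by simp at hl ⊢; omega)]
        rw [pvScan]
        have hfk : pvFirstKey [(k, v)] (c :: t) = none := by
          simp [pvFirstKey, List.find?, hpre]
        rw [hfk]
        simp

theorem pvReplace_eq_scan (k v : List Char) (hk : k ≠ []) (s : List Char) :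
    PySem.Chars.replace s k v = pvScan [(k, v)] s := by
  rw [PySem.Chars.replace]
  rw [if_neg (by simp [List.isEmpty_eq_false_iff.2 hk])]
  rw [pvGo_eq_scan k v hk s.length s [] le_rfl]
  simp

-- the scan walks through characters that head no key match
theorem pvScan_skip (k v : List Char) (hk : k ≠ [])
    (pre : List Char) (hch : ∀ c ∈ pre, c ∉ k) (X : List Char) :
    pvScan [(k, v)] (pre ++ X) = pre ++ pvScan [(k, v)] X := by
  induction pre with
  | nil => simp
  | cons c pre' ih =>
    have hfk : pvFirstKey [(k, v)] (c :: (pre' ++ X)) = none := by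
      cases k with
      | nil => exact absurd rfl hk
      | cons kh ktl =>
        have hne : kh ≠ c := by
          intro he; exact hch c (by simp) (by simp [he])
        have hb : (kh == c) = false := by simp [hne]
        simp [pvFirstKey, List.find?, List.isPrefixOf, hb]
    rw [List.cons_append, pvScan_cons_none hfk]
    rw [ih (fun c hc => hch c (by simp [hc]))]
    simp

-- scan output can only begin with a piece of the ORIGINAL text, as far as k's characters go
theorem pvScan_prefix_reflect (J : List (List Char × List Char)) (k : List Char)
    (hJout : ∀ p ∈ J, p.2 ≠ []) (hdisj : ∀ p ∈ J, ∀ c ∈ p.2, c ∉ k) :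
    ∀ t u, (∀ c ∈ u, c ∈ k) → u <+: pvScan J t → u <+: t := by
  have main : ∀ n t u, t.length ≤ n → (∀ c ∈ u, c ∈ k) → u <+: pvScan J t → u <+: t := by
    intro n
    induction n with
    | zero =>
      intro t u ht _ hu
      have : t = [] := by cases t <;> simp_all
      subst this
      rw [pvScan_nil] at hu
      simpa using hu
    | succ m ih =>
      intro t u ht hck hu
      cases t with
      | nil => rw [pvScan_nil] at hu; simpa using hu
      | cons c t' =>
        cases hJ : pvFirstKey J (c :: t') with
        | some p =>
          rw [pvScan_cons_some hJ] at hu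
          cases u with
          | nil => exact List.nil_prefix
          | cons d u' =>
            have hpmem : p ∈ J := List.mem_of_find?_eq_some hJ
            cases hp2 : p.2 with
            | nil => exact absurd hp2 (hJout p hpmem)
            | cons e r2 =>
              rw [hp2] at hu
              have hde : d = e := (List.cons_prefix_cons.1 (by simpa using hu)).1
              have : e ∉ k := hdisj p hpmem e (by simp [hp2])
              exact absurd (hck d (by simp)) (by rw [hde]; exact this)
        | none =>
          rw [pvScan_cons_none hJ] at hu
          cases u with
          | nil => exact List.nil_prefix
          | cons d u' =>
            obtain ⟨hdc, hu'⟩ := List.cons_prefix_cons.1 hu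
            have := ih t' u' (by simp at ht; omega) (fun c hc => hck c (by simp [hc])) hu'
            exact hdc ▸ List.cons_prefix_cons.2 ⟨rfl, this⟩
  exact fun t u => main t.length t u le_rfl

-- no key of J can fire anywhere inside u (overlap-freedom): the scan copies u verbatim
theorem pvScan_through (J : List (List Char × List Char)) :
    ∀ u rest, (∀ u', u' ≠ [] → u' <:+ u → ∀ p ∈ J, ¬(p.1 <+: u') ∧ ¬(u' <+: p.1)) →
      pvScan J (u ++ rest) = u ++ pvScan J rest := by
  intro u
  induction u with
  | nil => intro rest _; simp
  | cons c u' ih =>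
    intro rest hcond
    have hfk : pvFirstKey J ((c :: u') ++ rest) = none := by
      rw [pvFirstKey, List.find?_eq_none]
      intro p hp
      simp only [Bool.and_eq_true, Bool.not_eq_true', List.isEmpty_eq_false_iff,
        List.isPrefixOf_iff_prefix, not_and]
      intro _ hpre
      rcases List.prefix_or_prefix_of_prefix hpre (List.prefix_append (c :: u') rest) with
        h | h
      · exact (hcond (c :: u') (by simp) List.suffix_rfl p hp).1 h
      · exact (hcond (c :: u') (by simp) List.suffix_rfl p hp).2 h
    rw [List.cons_append, pvScan_cons_none (by simpa using hfk)]
    rw [ih rest (fun u'' hne hsuf p hp =>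
      hcond u'' hne (hsuf.trans (List.suffix_cons c u')) p hp)]
    simp

-- THE step: running one more replace pass after the scan of J = scanning with J ++ [(k,v)]
theorem pvStep (J : List (List Char × List Char)) (k v : List Char)
    (hk : k ≠ []) (hJout : ∀ p ∈ J, p.2 ≠ [])
    (hP1 : ∀ p ∈ J, ∀ c ∈ p.2, c ∉ k)
    (hP2 : ∀ o, 1 ≤ o → o < k.length → ∀ p ∈ J, ¬(p.1 <+: k.drop o) ∧ ¬(k.drop o <+: p.1))
    (s : List Char) :
    pvScan [(k, v)] (pvScan J s) = pvScan (J ++ [(k, v)]) s := by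
  have main : ∀ n s, s.length ≤ n →
      pvScan [(k, v)] (pvScan J s) = pvScan (J ++ [(k, v)]) s := by
    intro n
    induction n with
    | zero =>
      intro s hs
      have : s = [] := by cases s <;> simp_all
      subst this
      simp [pvScan_nil]
    | succ m ih =>
      intro s hs
      cases s with
      | nil => simp [pvScan_nil]
      | cons c t =>
        cases hJ : pvFirstKey J (c :: t) with
        | some p =>
          have hpfacts := pvFirstKey_some hJ
          have hpmem : p ∈ J := List.mem_of_find?_eq_some hJ
          have hfk2 : pvFirstKey (J ++ [(k, v)]) (c :: t) = some p := by
            rw [pvFirstKey, List.find?_append]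
            rw [pvFirstKey] at hJ
            rw [hJ]
            rfl
          rw [pvScan_cons_some hJ, pvScan_cons_some hfk2]
          rw [pvScan_skip k v hk p.2 (hP1 p hpmem) _]
          congr 1
          apply ih
          have h1 : 1 ≤ p.1.length := by
            cases hp1 : p.1
            · exact absurd hp1 hpfacts.1
            · simp
          have h2 := hpfacts.2.length_le
          simp only [List.length_drop]
          simp at hs h2 ⊢
          omega
        | none =>
          by_cases hkp : k <+: (c :: t)
          · cases k with
            | nil => exact absurd rfl hk
            | cons kh ktl =>
              obtain ⟨hkh, hktl⟩ := List.cons_prefix_cons.1 hkp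
              obtain ⟨rest, hrest⟩ := hktl
              have hthrough : pvScan J (ktl ++ rest) = ktl ++ pvScan J rest := by
                apply pvScan_through
                intro u' hne hsuf p hp
                obtain ⟨pre, hpre⟩ := hsuf
                have ho : (kh :: ktl).drop (1 + pre.length) = u' := by
                  rw [show 1 + pre.length = pre.length + 1 by omega]
                  rw [List.drop_succ_cons, ← hpre, List.drop_left]
                have hu1 : 1 ≤ u'.length := by cases u' <;> simp_all
                have hlen : pre.length + u'.length = ktl.length := by
                  rw [← hpre]; simp
                have h2 : 1 + pre.length < (kh :: ktl).length := by simp; omega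
                have := hP2 (1 + pre.length) (by omega) h2 p hp
                rw [ho] at this
                exact this
              have e1 : pvScan J (c :: t) = (kh :: ktl) ++ pvScan J rest := by
                rw [pvScan_cons_none hJ, ← hrest, hthrough]
                simp [hkh]
              rw [e1]
              have hpp : (kh :: ktl).isPrefixOf ((kh :: ktl) ++ pvScan J rest) = true :=
                List.isPrefixOf_iff_prefix.2 (List.prefix_append _ _)
              have hfk1 : pvFirstKey [(kh :: ktl, v)] (kh :: (ktl ++ pvScan J rest))
                  = some (kh :: ktl, v) := by
                simp only [pvFirstKey, List.find?, ← List.cons_append, hpp]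
                simp
              rw [List.cons_append, pvScan_cons_some hfk1]
              have hfk3 : pvFirstKey (J ++ [(kh :: ktl, v)]) (c :: t)
                  = some (kh :: ktl, v) := by
                rw [pvFirstKey, List.find?_append]
                rw [pvFirstKey] at hJ
                rw [hJ]
                have : (kh :: ktl).isPrefixOf (c :: t) = true :=
                  List.isPrefixOf_iff_prefix.2 hkp
                simp [List.find?, this]
              rw [pvScan_cons_some hfk3]
              simp only [← List.cons_append, List.drop_left]
              have hdrop : List.drop (kh :: ktl).length (c :: t) = rest := by
                simp only [List.length_cons, List.drop_succ_cons, ← hrest, List.drop_left]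
              rw [hdrop]
              congr 1
              apply ih
              have : t.length = ktl.length + rest.length := by rw [← hrest]; simp
              simp at hs
              omega
          · have hfk1 : pvFirstKey [(k, v)] (c :: pvScan J t) = none := by
              rw [pvFirstKey, List.find?_eq_none]
              intro p hp
              simp only [List.mem_singleton] at hp
              subst hp
              simp only [Bool.and_eq_true, Bool.not_eq_true', List.isEmpty_eq_false_iff,
                List.isPrefixOf_iff_prefix, not_and]
              intro _ hpre
              cases k with
              | nil => exact absurd rfl hk
              | cons kh ktl =>
                obtain ⟨hkh, hktl⟩ := List.cons_prefix_cons.1 hpre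
                have := pvScan_prefix_reflect J (kh :: ktl) hJout hP1 t ktl
                  (fun c hc => by simp [hc]) hktl
                exact hkp (List.cons_prefix_cons.2 ⟨hkh, this⟩)
            rw [pvScan_cons_none hJ, pvScan_cons_none hfk1]
            have hfk3 : pvFirstKey (J ++ [(k, v)]) (c :: t) = none := by
              rw [pvFirstKey, List.find?_append]
              rw [pvFirstKey] at hJ
              rw [hJ]
              have : k.isPrefixOf (c :: t) = false := by
                rw [← Bool.not_eq_true, List.isPrefixOf_iff_prefix]
                exact hkp
              simp [List.find?, this]
            rw [pvScan_cons_none hfk3]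
            congr 1
            apply ih
            simp at hs
            omega
  exact main s.length s le_rfl

-- decidable side conditions of pvStep, checked key by key against all earlier keys
def pvStepOk (J : List (List Char × List Char)) (k v : List Char) : Bool :=
  !k.isEmpty && !v.isEmpty &&
  J.all (fun p => p.2.all (fun c => !k.contains c)) &&
  (List.range k.length).all (fun o =>
    o == 0 || J.all (fun p => !(p.1.isPrefixOf (k.drop o)) && !((k.drop o).isPrefixOf p.1)))

def pvGoodFrom (J : List (List Char × List Char)) : List (List Char × List Char) → Bool
  | [] => true
  | p :: rest => pvStepOk J p.1 p.2 && pvGoodFrom (J ++ [p]) rest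

theorem pvStepOk_spec {J : List (List Char × List Char)} {k v : List Char}
    (h : pvStepOk J k v = true) :
    k ≠ [] ∧ v ≠ [] ∧ (∀ p ∈ J, ∀ c ∈ p.2, c ∉ k) ∧
      (∀ o, 1 ≤ o → o < k.length → ∀ p ∈ J, ¬(p.1 <+: k.drop o) ∧ ¬(k.drop o <+: p.1)) := by
  simp only [pvStepOk, Bool.and_eq_true, List.all_eq_true, Bool.not_eq_true',
    List.isEmpty_eq_false_iff, List.contains_eq_mem, decide_eq_false_iff_not,
    List.mem_range, Bool.or_eq_true, beq_iff_eq] at h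
  obtain ⟨⟨⟨hk, hv⟩, h1⟩, h2⟩ := h
  refine ⟨hk, hv, fun p hp c hc => h1 p hp c hc, fun o ho1 ho2 p hp => ?_⟩
  rcases h2 o ho2 with h | h
  · omega
  · obtain ⟨ha, hb⟩ := h p hp
    constructor
    · intro hc; rw [← List.isPrefixOf_iff_prefix] at hc; exact absurd hc (by simp [ha])
    · intro hc; rw [← List.isPrefixOf_iff_prefix] at hc; exact absurd hc (by simp [hb])

theorem pvFold_eq_scan (K : List (List Char × List Char)) :
    ∀ J, (∀ p ∈ J, p.2 ≠ []) → pvGoodFrom J K = true →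
      ∀ s, List.foldl (fun t p => pvScan [p] t) (pvScan J s) K = pvScan (J ++ K) s := by
  induction K with
  | nil => intro J _ _ s; simp
  | cons p rest ih =>
    intro J hJout hg s
    have hg' : pvStepOk J p.1 p.2 = true ∧ pvGoodFrom (J ++ [p]) rest = true := by
      simpa [pvGoodFrom] using hg
    obtain ⟨hk, hv, hP1, hP2⟩ := pvStepOk_spec hg'.1
    simp only [List.foldl_cons]
    rw [pvStep J p.1 p.2 hk hJout hP1 hP2 s]
    have hout' : ∀ q ∈ J ++ [p], q.2 ≠ [] := by
      intro q hq
      rcases List.mem_append.1 hq with h | h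
      · exact hJout q h
      · simp at h; subst h; exact hv
    have := ih (J ++ [p]) hout' hg'.2 s
    simpa using this

theorem pvRepl_fold_eq (K : List (List Char × List Char)) (hne : ∀ p ∈ K, p.1 ≠ []) :
    ∀ s, List.foldl (fun t p => PySem.Chars.replace t p.1 p.2) s K
         = List.foldl (fun t p => pvScan [p] t) s K := by
  induction K with
  | nil => intro s; rfl
  | cons p rest ih =>
    intro s
    simp only [List.foldl_cons]
    rw [pvReplace_eq_scan p.1 p.2 (hne p (by simp)) s]
    exact ih (fun q hq => hne q (by simp [hq])) _

theorem pvMain (s : List Char) :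
    List.foldl (fun t p => PySem.Chars.replace t p.1 p.2) s pvKeys = pvScan pvKeys s := by
  rw [pvRepl_fold_eq pvKeys (by decide) s]
  have := pvFold_eq_scan pvKeys [] (by simp) (by decide) s
  rw [pvScan_empty] at this
  simpa using this

theorem pvToList_fold (pairs : List (String × String)) (s : String) :
    (List.foldl (fun t p => PySem.Str.replace t p.1 p.2) s pairs).toList
    = List.foldl (fun t p => PySem.Chars.replace t p.1.toList p.2.toList) s.toList pairs := by
  induction pairs generalizing s with
  | nil => rfl
  | cons p rest ih =>
    simp only [List.foldl_cons]
    rw [ih, PySem.Str.toList_replace]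

-- ===== VERDICT (by name: the statement is the Claim_ definition above) =====
theorem latex_to_utf8_spec : Claim_equal_latex_to_utf8 := by
  intro text _
  unfold Spec_latex_to_utf8 latex_to_utf8 latex_to_utf8_alt
  rw [← String.toList_inj, String.toList_ofList, ← pvMain]
  rw [pvToList_fold]
  have hmap : pvKeys = pvReplacements.map (fun p => (p.1.toList, p.2.toList)) := by decide
  rw [hmap, List.foldl_map]
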